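-- pv_equiv track=rewrite | github.com/rtindru/GoogleCodeJam2020 | hacked_exam.py | gen_combos
-- ===== SOURCE A (Python) =====
-- from itertools import combinations
--
-- def invert(ans):
--     if ans == "T":
--         return "F"
--     return "T"
--
-- def gen_combos(keystr, num_right):
--     size = len(keystr)
--     combos = combinations(range(size), num_right)
--     for combo in combos:
--         res = []
--         for i in range(size):
--             og_ans = keystr[i]
--             if i in combo:
--                 res.append(og_ans)
--             else:
--                 res.append(invert(og_ans))
--         yield "".join(res)
-- ===== SOURCE B (Python) =====
-- def invert(ans):
--     if ans == "T":
--         return "F"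
--     return "T"
--
-- def gen_combos(keystr, num_right):
--     n = len(keystr)
--
--     def rec(i, k, prefix):
--         if k < 0 or k > n - i:
--             return
--         if i == n:
--             yield prefix
--             return
--         yield from rec(i + 1, k - 1, prefix + keystr[i])
--         yield from rec(i + 1, k, prefix + invert(keystr[i]))
--
--     yield from rec(0, num_right, "")
-- ===== Notes on version B (the rewrite author's own statement) =====
-- stated objective: alternative
-- what changed: B generates the answer strings by direct recursive backtracking over positions (branch: keep the answer if budget remains, or flip it), never materialising itertools index combinations or scanning positions per combination.
import Mathlib
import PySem

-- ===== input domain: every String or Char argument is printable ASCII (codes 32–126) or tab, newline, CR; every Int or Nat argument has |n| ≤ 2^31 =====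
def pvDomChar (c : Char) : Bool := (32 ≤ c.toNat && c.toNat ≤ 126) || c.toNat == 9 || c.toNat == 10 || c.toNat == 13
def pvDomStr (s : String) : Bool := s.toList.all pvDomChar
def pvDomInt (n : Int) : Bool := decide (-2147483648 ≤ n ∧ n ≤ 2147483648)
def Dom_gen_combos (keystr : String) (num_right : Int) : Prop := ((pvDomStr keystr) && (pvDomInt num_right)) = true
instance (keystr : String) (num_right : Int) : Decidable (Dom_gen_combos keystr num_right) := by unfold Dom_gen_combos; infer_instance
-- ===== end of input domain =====

-- B replaces A's itertools.combinations enumeration + per-position membership scan by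
-- direct recursive backtracking over positions (keep the answer if budget remains, or
-- flip it), which emits the same strings in the same order (alternative algorithm).

-- ===== PORT A =====
-- itertools.combinations(range(n), k) in its lexicographic emission order
def pyCombinations : List Nat → Nat → List (List Nat)
  | _, 0 => [[]]
  | [], _ + 1 => []
  | x :: xs, k + 1 => (pyCombinations xs k).map (fun c => x :: c) ++ pyCombinations xs (k + 1)

def invertA (ans : Char) : Char := if ans = 'T' then 'F' else 'T'

def gen_combos (keystr : String) (num_right : Int) : List String :=
  let cs := keystr.toList
  let size := cs.length
  (pyCombinations (List.range size) num_right.toNat).map (fun combo =>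
    String.mk ((List.range size).map (fun i =>
      let og_ans := cs.getD i 'T'   -- i < size, so the default is never used
      if i ∈ combo then og_ans else invertA og_ans)))

-- ===== PORT B =====
def invertB (ans : Char) : Char := if ans = 'T' then 'F' else 'T'

-- rec(i, k, prefix) of Source B; the suffix keystr[i:] is the structural argument and the
-- growing prefix string is carried as a List Char
def genRec (cs : List Char) (k : Int) (pre : List Char) : List (List Char) :=
  if k < 0 ∨ (cs.length : Int) < k then []
  else
    match cs with
    | [] => [pre]
    | c :: rest => genRec rest (k - 1) (pre ++ [c]) ++ genRec rest k (pre ++ [invertB c])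

def gen_combos_alt (keystr : String) (num_right : Int) : List String :=
  (genRec keystr.toList num_right []).map String.mk

-- ===== PRECONDITION & SPEC =====
-- Pre_ excludes exactly num_right < 0, where Python's A raises ValueError (combinations).
def Pre_gen_combos (keystr : String) (num_right : Int) : Prop := 0 ≤ num_right
instance (keystr : String) (num_right : Int) : Decidable (Pre_gen_combos keystr num_right) := by unfold Pre_gen_combos; infer_instance
def pvWitness_gen_combos : String × Int := ("TF", 1)

def Spec_gen_combos (keystr : String) (num_right : Int) (out : List String) : Prop := out = gen_combos_alt keystr num_right
instance (keystr : String) (num_right : Int) (out : List String) : Decidable (Spec_gen_combos keystr num_right out) := by unfold Spec_gen_combos; infer_instance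

-- ===== CLAIM =====
def Claim_equal_gen_combos : Prop := ∀ (keystr : String) (num_right : Int), Dom_gen_combos keystr num_right → Pre_gen_combos keystr num_right → Spec_gen_combos keystr num_right (gen_combos keystr num_right)

-- ===== LEMMAS AND PROOFS =====

theorem pyCombinations_eq_nil {xs : List Nat} {k : Nat} (h : xs.length < k) :
    pyCombinations xs k = [] := by
  induction xs generalizing k with
  | nil => cases k with
    | zero => omega
    | succ k => rfl
  | cons x xs ih =>
    cases k with
    | zero => omega
    | succ k =>
      simp at h
      rw [show pyCombinations (x :: xs) (k + 1)
            = (pyCombinations xs k).map (fun c => x :: c) ++ pyCombinations xs (k + 1) from rfl]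
      rw [ih (k := k) (by omega), ih (k := k + 1) (by omega)]
      rfl

theorem pyCombinations_map (f : Nat → Nat) (xs : List Nat) (k : Nat) :
    pyCombinations (xs.map f) k = (pyCombinations xs k).map (List.map f) := by
  induction xs generalizing k with
  | nil => cases k <;> rfl
  | cons x xs ih =>
    cases k with
    | zero => rfl
    | succ k => simp [pyCombinations, ih]

-- unfolding lemmas for genRec's three shapes
theorem genRec_out (cs : List Char) (k : Int) (pre : List Char)
    (h : k < 0 ∨ (cs.length : Int) < k) : genRec cs k pre = [] := by
  unfold genRec; rw [if_pos h]

theorem genRec_cons (c : Char) (rest : List Char) (k : Int) (pre : List Char)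
    (h : ¬(k < 0 ∨ ((c :: rest).length : Int) < k)) :
    genRec (c :: rest) k pre
      = genRec rest (k - 1) (pre ++ [c]) ++ genRec rest k (pre ++ [invertB c]) := by
  conv_lhs => unfold genRec
  rw [if_neg h]

theorem invert_eq : invertB = invertA := rfl

theorem pyCombinations_zero (xs : List Nat) : pyCombinations xs 0 = [[]] := by
  cases xs <;> rfl

-- rendering function used by A's port
def renderA (cs : List Char) (combo : List Nat) : List Char :=
  (List.range cs.length).map (fun i =>
    let og_ans := cs.getD i 'T'
    if i ∈ combo then og_ans else invertA og_ans)

theorem renderA_keep (c : Char) (rest : List Char) (combo : List Nat) :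
    renderA (c :: rest) (0 :: combo.map Nat.succ) = c :: renderA rest combo := by
  unfold renderA
  simp only [List.length_cons, List.range_succ_eq_map, List.map_cons, List.map_map]
  refine congrArg₂ List.cons (by simp) ?_
  apply List.map_congr_left
  intro i _
  simp [Function.comp]

theorem renderA_flip (c : Char) (rest : List Char) (combo : List Nat) :
    renderA (c :: rest) (combo.map Nat.succ) = invertA c :: renderA rest combo := by
  unfold renderA
  simp only [List.length_cons, List.range_succ_eq_map, List.map_cons, List.map_map]
  refine congrArg₂ List.cons (by simp) ?_
  apply List.map_congr_left
  intro i _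
  simp [Function.comp]

theorem genRec_eq (cs : List Char) (k : Nat) (pre : List Char) :
    genRec cs (k : Int) pre
      = (pyCombinations (List.range cs.length) k).map (fun combo => pre ++ renderA cs combo) := by
  induction cs generalizing k pre with
  | nil =>
    cases k with
    | zero =>
      rw [show genRec [] ((0 : Nat) : Int) pre = [pre] by unfold genRec; rw [if_neg (by norm_num)]]
      simp [pyCombinations, renderA]
    | succ k =>
      rw [genRec_out _ _ _ (by right; simp only [List.length_nil]; push_cast; omega)]
      rfl
  | cons c rest ih =>
    by_cases hk : k ≤ rest.length + 1
    · rw [genRec_cons _ _ _ _ (by simp only [List.length_cons]; push_cast; omega)]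
      cases k with
      | zero =>
        rw [genRec_out _ _ _ (by left; norm_num), List.nil_append, ih]
        rw [pyCombinations_zero, pyCombinations_zero]
        have h0 := renderA_flip c rest []
        simp only [List.map_nil] at h0
        simp [h0, invert_eq]
      | succ k =>
        rw [show ((k + 1 : Nat) : Int) - 1 = ((k : Nat) : Int) by push_cast; omega, ih, ih]
        have hr : List.range (c :: rest).length = 0 :: (List.range rest.length).map Nat.succ := by
          simp [List.range_succ_eq_map]
        rw [hr,
            show pyCombinations (0 :: (List.range rest.length).map Nat.succ) (k + 1)
              = (pyCombinations ((List.range rest.length).map Nat.succ) k).map (fun c => 0 :: c)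
                ++ pyCombinations ((List.range rest.length).map Nat.succ) (k + 1) from rfl,
            pyCombinations_map, pyCombinations_map]
        simp only [List.map_append, List.map_map]
        congr 1
        · apply List.map_congr_left
          intro combo _
          simp [Function.comp, renderA_keep]
        · apply List.map_congr_left
          intro combo _
          simp [Function.comp, renderA_flip, invert_eq]
    · rw [genRec_out _ _ _ (by right; simp only [List.length_cons]; push_cast; omega),
          pyCombinations_eq_nil (by simp only [List.length_range, List.length_cons]; omega)]
      rfl

-- ===== VERDICT =====
theorem gen_combos_spec : Claim_equal_gen_combos := by
  intro keystr num_right _ hpre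
  unfold Spec_gen_combos gen_combos gen_combos_alt
  obtain ⟨n, rfl⟩ : ∃ n : ℕ, num_right = (n : Int) :=
    ⟨num_right.toNat, by unfold Pre_gen_combos at hpre; omega⟩
  rw [genRec_eq]
  simp [renderA, Function.comp]
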